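-- pv_equiv track=rewrite | github.com/Bruhtek/agh-wdi | zestawy/02 - tablice 1D/z94.py | square_tab
-- ===== SOURCE A (Python) =====
-- def square_tab(tab)->list[int]:
--     n = len(tab)
--     res = [0 for _ in range(n*2)]
--     for i in range(n):
--         for j in range(n):
--             res[i+j] += tab[i] * tab[j]
--
--     for i in range(n*2-1,0, -1):
--         curr = res[i]
--         if curr > 9:
--             carry = curr // 10
--             res[i-1] += carry
--             res[i] %= 10
--     return res
-- ===== SOURCE B (Python) =====
-- def square_tab(tab) -> list[int]:
--     n = len(tab)
--     # per-output-index convolution using symmetry (each unordered pair counted once, doubled)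
--     conv = []
--     for k in range(2 * n):
--         lo = max(0, k - n + 1)
--         s = 2 * sum(tab[i] * tab[k - i] for i in range(lo, (k + 1) // 2))
--         if k % 2 == 0 and k // 2 < n:
--             s += tab[k // 2] * tab[k // 2]
--         conv.append(s)
--     # single right-to-left carry pass with a running carry, building the output backwards
--     out = []
--     carry = 0
--     for k in range(2 * n - 1, 0, -1):
--         v = conv[k] + carry
--         if v > 9:
--             carry = v // 10
--             v %= 10
--         else:
--             carry = 0
--         out.append(v)
--     if n > 0:
--         out.append(conv[0] + carry)
--     out.reverse()
--     return out
-- ===== Notes on version B (the rewrite author's own statement) =====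
-- stated objective: faster
-- what changed: B computes each convolution entry directly as a symmetric half-sum over unordered index pairs (doubled, plus the middle square) instead of A's in-place double loop of array updates, and replaces A's in-place downward carry loop by a single right-to-left pass with a running carry that builds the output list backwards and reverses it.
import Mathlib
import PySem

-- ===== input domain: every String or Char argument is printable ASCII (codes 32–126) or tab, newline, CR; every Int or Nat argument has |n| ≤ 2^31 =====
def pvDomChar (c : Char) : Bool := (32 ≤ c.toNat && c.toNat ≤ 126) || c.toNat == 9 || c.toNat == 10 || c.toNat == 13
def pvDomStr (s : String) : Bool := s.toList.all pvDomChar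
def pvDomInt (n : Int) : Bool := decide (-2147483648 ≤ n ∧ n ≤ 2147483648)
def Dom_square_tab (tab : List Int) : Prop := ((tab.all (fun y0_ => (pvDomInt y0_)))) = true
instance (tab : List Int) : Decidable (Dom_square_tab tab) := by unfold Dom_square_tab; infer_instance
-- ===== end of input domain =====

-- B replaces A's quadratic array-update double loop by per-index symmetric half-sums
-- (each unordered pair counted once and doubled) and A's in-place carry loop by a single
-- right-to-left pass with a running carry that builds the output backwards (objective: faster by a constant factor — about half the multiplications).

-- ===== PORT A =====
-- All Python indices here are provably in range (i+j ≤ 2n-2, 1 ≤ i ≤ 2n-1),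
-- so List.getD / List.set realize Python's list indexing exactly;
-- the countdown range(n*2-1, 0, -1) is PySem.List.pyRange, its elements are ≥ 1 so .toNat is exact.
def square_tab (tab : List Int) : List Int :=
  let n := tab.length
  let res0 := (List.range (n*2)).map (fun _ => (0:Int))
  let res1 := (List.range n).foldl (fun r i =>
    (List.range n).foldl (fun r j =>
      r.set (i+j) (r.getD (i+j) 0 + tab.getD i 0 * tab.getD j 0)) r) res0
  (PySem.List.pyRange ((n:Int)*2 - 1) 0 (-1)).foldl (fun r i =>
    let curr := r.getD i.toNat 0
    if curr > 9 then
      let carry := PySem.Int.floordiv curr 10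
      let r' := r.set (i.toNat - 1) (r.getD (i.toNat - 1) 0 + carry)
      r'.set i.toNat (PySem.Int.mod curr 10)
    else r) res1

-- ===== PORT B =====
-- conv[k] = 2·Σ_{lo ≤ i < (k+1)/2} tab[i]·tab[k-i] (+ middle square for even k);
-- Python's max(0, k-n+1) is Nat truncated subtraction k+1-n, range(lo,hi) is List.range' lo (hi-lo).
def square_tab_alt (tab : List Int) : List Int :=
  let n := tab.length
  let conv := (List.range (2*n)).foldl (fun conv k =>
    let lo := k + 1 - n
    let hi := (k + 1) / 2
    let s := 2 * ((List.range' lo (hi - lo)).map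
                    (fun i => tab.getD i 0 * tab.getD (k - i) 0)).sum
    let s := if k % 2 = 0 ∧ k / 2 < n then s + tab.getD (k/2) 0 * tab.getD (k/2) 0 else s
    conv ++ [s]) []
  let st := (PySem.List.pyRange (2*(n:Int) - 1) 0 (-1)).foldl
    (fun (st : Int × List Int) (k : Int) =>
      let v := conv.getD k.toNat 0 + st.1
      if v > 9 then (PySem.Int.floordiv v 10, st.2 ++ [PySem.Int.mod v 10])
      else (0, st.2 ++ [v])) ((0 : Int), ([] : List Int))
  let out := if 0 < n then st.2 ++ [conv.getD 0 0 + st.1] else st.2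
  out.reverse

-- ===== PRECONDITION & SPEC =====
def Spec_square_tab (tab : List Int) (out : List Int) : Prop := out = square_tab_alt tab
instance (tab : List Int) (out : List Int) : Decidable (Spec_square_tab tab out) := by unfold Spec_square_tab; infer_instance

-- ===== CLAIM (what is proved, stated in full; the proofs are below) =====
def Claim_equal_square_tab : Prop := ∀ (tab : List Int), Dom_square_tab tab → Spec_square_tab tab (square_tab tab)

-- ===== LEMMAS AND PROOFS =====

-- the exact convolution value at output index k
def convS (tab : List Int) (k : Nat) : Int :=
  ∑ i ∈ Finset.range tab.length, ∑ j ∈ Finset.range tab.length,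
    if i + j = k then tab.getD i 0 * tab.getD j 0 else 0

-- B's per-index entry
def bEntry (tab : List Int) (k : Nat) : Int :=
  let n := tab.length
  let s := 2 * ((List.range' (k + 1 - n) ((k+1)/2 - (k + 1 - n))).map
                  (fun i => tab.getD i 0 * tab.getD (k - i) 0)).sum
  if k % 2 = 0 ∧ k / 2 < n then s + tab.getD (k/2) 0 * tab.getD (k/2) 0 else s

-- right-to-left carry propagation over a suffix: (carry out, digits)
def fixTail : List Int → Int × List Int
  | [] => (0, [])
  | x :: xs =>
      let p := fixTail xs
      let v := x + p.1
      if v > 9 then (PySem.Int.floordiv v 10, PySem.Int.mod v 10 :: p.2) else (0, v :: p.2)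

-- generic accumulation: fold of in-range additive set-updates
def applyUpds (r : List Int) (us : List (Nat × Int)) : List Int :=
  us.foldl (fun r u => r.set u.1 (r.getD u.1 0 + u.2)) r

theorem getD_set (r : List Int) (p : Nat) (w : Int) (hp : p < r.length) (k : Nat) :
    (r.set p w).getD k 0 = if p = k then w else r.getD k 0 := by
  simp [List.getD_eq_getElem?_getD, List.getElem?_set]
  split_ifs with h1 <;> simp_all

theorem applyUpds_length (r : List Int) (us : List (Nat × Int)) :
    (applyUpds r us).length = r.length := by
  induction us generalizing r with
  | nil => rfl
  | cons u us ih => simp only [applyUpds, List.foldl_cons] at *; rw [ih]; simp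

theorem applyUpds_getD (r : List Int) (us : List (Nat × Int))
    (h : ∀ u ∈ us, u.1 < r.length) (k : Nat) :
    (applyUpds r us).getD k 0 =
      r.getD k 0 + ((us.filter (fun u => u.1 = k)).map Prod.snd).sum := by
  induction us generalizing r with
  | nil => simp [applyUpds]
  | cons u us ih =>
    simp only [applyUpds, List.foldl_cons] at *
    rw [ih _ (fun v hv => by simpa using h v (List.mem_cons_of_mem _ hv))]
    rw [getD_set _ _ _ (h u (List.mem_cons_self)) k]
    by_cases hu : u.1 = k
    · simp [hu]; ring
    · simp [hu]

theorem foldl_flatMap {α β γ : Type} (l : List α) (F : α → List β) (g : γ → β → γ) (init : γ) :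
    (l.flatMap F).foldl g init = l.foldl (fun a x => (F x).foldl g a) init := by
  induction l generalizing init with
  | nil => rfl
  | cons x l ih => simp [List.flatMap_cons, List.foldl_append, ih]

theorem sum_map_range (n : Nat) (f : Nat → Int) :
    ((List.range n).map f).sum = ∑ i ∈ Finset.range n, f i := by
  induction n with
  | zero => simp
  | succ n ih => simp [List.range_succ, Finset.sum_range_succ, ih]

theorem sum_filter_map_flatMap {α : Type} (l : List α) (F : α → List (Nat × Int)) (k : Nat) :
    (((l.flatMap F).filter (fun u => u.1 = k)).map Prod.snd).sum
      = (l.map (fun x => (((F x).filter (fun u => u.1 = k)).map Prod.snd).sum)).sum := by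
  induction l with
  | nil => simp
  | cons x l ih => simp [List.flatMap_cons, List.filter_append, ih]

theorem sum_filter_map_map {α : Type} (l : List α) (f : α → Nat × Int) (k : Nat) :
    (((l.map f).filter (fun u => u.1 = k)).map Prod.snd).sum
      = (l.map (fun x => if (f x).1 = k then (f x).2 else 0)).sum := by
  induction l with
  | nil => simp
  | cons x l ih =>
    simp only [List.map_cons, List.filter_cons]
    by_cases h : (f x).1 = k <;> simp [h, ih]

theorem pvInnerSum (tab : List Int) (k i : Nat) :
    (∑ j ∈ Finset.range tab.length, if i + j = k then tab.getD i 0 * tab.getD j 0 else 0)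
      = if i ≤ k ∧ k - i < tab.length then tab.getD i 0 * tab.getD (k - i) 0 else 0 := by
  by_cases hik : i ≤ k
  · have : ∀ j ∈ Finset.range tab.length,
        (if i + j = k then tab.getD i 0 * tab.getD j 0 else 0)
          = (if j = k - i then tab.getD i 0 * tab.getD j 0 else 0) := by
      intro j _
      have : (i + j = k) ↔ (j = k - i) := by omega
      simp [this]
    rw [Finset.sum_congr rfl this, Finset.sum_ite_eq' (Finset.range tab.length) (k - i)]
    simp [hik]
  · rw [Finset.sum_eq_zero, if_neg (by omega)]
    intro j _; rw [if_neg (by omega)]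

theorem convS_eq_Ico (tab : List Int) (k : Nat) :
    convS tab k = ∑ i ∈ Finset.Ico (k + 1 - tab.length) (min tab.length (k+1)),
      tab.getD i 0 * tab.getD (k - i) 0 := by
  unfold convS
  rw [Finset.sum_congr rfl (fun i _ => pvInnerSum tab k i)]
  rw [Finset.sum_ite, Finset.sum_const_zero, add_zero]
  apply Finset.sum_congr _ (fun _ _ => rfl)
  ext i
  simp only [Finset.mem_filter, Finset.mem_range, Finset.mem_Ico]
  omega

-- the symmetric halving
theorem convS_sym (tab : List Int) (k : Nat) (hk : k < 2 * tab.length) :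
    convS tab k =
      2 * (∑ i ∈ Finset.Ico (k + 1 - tab.length) ((k+1)/2), tab.getD i 0 * tab.getD (k - i) 0)
      + (if k % 2 = 0 ∧ k / 2 < tab.length then tab.getD (k/2) 0 * tab.getD (k/2) 0 else 0) := by
  set n := tab.length with hn
  set lo := k + 1 - n with hlo
  set m := min n (k+1) with hm
  set h := (k+1)/2 with hh
  set f : Nat → Int := fun i => tab.getD i 0 * tab.getD (k - i) 0 with hf
  rw [convS_eq_Ico]
  have hsplit : ∑ i ∈ Finset.Ico lo m, f i
      = (∑ i ∈ (Finset.Ico lo m).filter (fun i => 2*i < k), f i)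
        + ((∑ i ∈ ((Finset.Ico lo m).filter (fun i => ¬ 2*i < k)).filter (fun i => 2*i = k), f i)
          + (∑ i ∈ ((Finset.Ico lo m).filter (fun i => ¬ 2*i < k)).filter (fun i => ¬ 2*i = k), f i)) := by
    rw [Finset.sum_filter_add_sum_filter_not, Finset.sum_filter_add_sum_filter_not]
  rw [hsplit]
  have h1 : (Finset.Ico lo m).filter (fun i => 2*i < k) = Finset.Ico lo h := by
    ext i; simp only [Finset.mem_filter, Finset.mem_Ico]; omega
  have h2 : ((Finset.Ico lo m).filter (fun i => ¬ 2*i < k)).filter (fun i => 2*i = k)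
      = if k % 2 = 0 then {k/2} else ∅ := by
    split_ifs with he
    · ext i
      simp only [Finset.mem_filter, Finset.mem_Ico, Finset.mem_singleton]
      omega
    · ext i
      simp only [Finset.mem_filter, Finset.mem_Ico, Finset.notMem_empty, iff_false]
      intro hcon
      omega
  have h3 : ∑ i ∈ ((Finset.Ico lo m).filter (fun i => ¬ 2*i < k)).filter (fun i => ¬ 2*i = k), f i
      = ∑ i ∈ Finset.Ico lo h, f i := by
    apply Finset.sum_nbij' (fun i => k - i) (fun i => k - i)
    · intro a ha
      simp only [Finset.mem_filter, Finset.mem_Ico] at ha ⊢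
      omega
    · intro a ha
      simp only [Finset.mem_filter, Finset.mem_Ico] at ha ⊢
      omega
    · intro a ha
      simp only [Finset.mem_filter, Finset.mem_Ico] at ha
      omega
    · intro a ha
      simp only [Finset.mem_Ico] at ha
      omega
    · intro a ha
      simp only [Finset.mem_filter, Finset.mem_Ico] at ha
      have : k - (k - a) = a := by omega
      rw [hf]; simp only [this]; ring
  rw [h1, h2, h3]
  have hmid : (∑ i ∈ (if k % 2 = 0 then ({k/2} : Finset Nat) else ∅), f i)
      = (if k % 2 = 0 ∧ k / 2 < n then tab.getD (k/2) 0 * tab.getD (k/2) 0 else 0) := by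
    by_cases he : k % 2 = 0
    · have hc : k / 2 < n := by omega
      rw [if_pos he, if_pos ⟨he, hc⟩, Finset.sum_singleton, hf]
      have h4 : k - k/2 = k/2 := by omega
      simp only [h4]
    · rw [if_neg he, if_neg (fun hcon => he hcon.1), Finset.sum_empty]
  rw [hmid]; ring

-- B's list-sum entry equals convS
theorem bEntry_eq_convS (tab : List Int) (k : Nat) (hk : k < 2 * tab.length) :
    bEntry tab k = convS tab k := by
  unfold bEntry
  dsimp only
  rw [convS_sym tab k hk]
  have hsum : ((List.range' (k + 1 - tab.length) ((k+1)/2 - (k + 1 - tab.length))).map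
        (fun i => tab.getD i 0 * tab.getD (k - i) 0)).sum
      = ∑ i ∈ Finset.Ico (k + 1 - tab.length) ((k+1)/2), tab.getD i 0 * tab.getD (k - i) 0 := by
    rw [List.range'_eq_map_range, List.map_map, sum_map_range, Finset.sum_Ico_eq_sum_range]
    apply Finset.sum_congr _ (fun _ _ => rfl)
    congr 1
  rw [hsum]
  split_ifs with h <;> ring

-- A's update-pair list
def pairsA (tab : List Int) : List (Nat × Int) :=
  (List.range tab.length).flatMap (fun i =>
    (List.range tab.length).map (fun j => (i+j, tab.getD i 0 * tab.getD j 0)))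

theorem loopA_eq_applyUpds (tab : List Int) (r : List Int) :
    (List.range tab.length).foldl (fun r i =>
      (List.range tab.length).foldl (fun r j =>
        r.set (i+j) (r.getD (i+j) 0 + tab.getD i 0 * tab.getD j 0)) r) r
    = applyUpds r (pairsA tab) := by
  rw [applyUpds, pairsA, foldl_flatMap]
  congr 1
  funext acc x
  rw [List.foldl_map]

theorem pairsA_fst_lt (tab : List Int) (u : Nat × Int) (hu : u ∈ pairsA tab) :
    u.1 < tab.length * 2 := by
  simp only [pairsA, List.mem_flatMap, List.mem_map, List.mem_range] at hu
  obtain ⟨i, hi, j, hj, rfl⟩ := hu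
  omega

theorem pairsA_sum (tab : List Int) (k : Nat) :
    (((pairsA tab).filter (fun u => u.1 = k)).map Prod.snd).sum = convS tab k := by
  rw [pairsA, sum_filter_map_flatMap, convS]
  rw [sum_map_range]
  apply Finset.sum_congr rfl
  intro i _
  rw [sum_filter_map_map, sum_map_range]

-- countdown range decomposition at the low end
theorem pyRange_neg_one_append_low (a b : Int) (h : b < a) :
    PySem.List.pyRange a b (-1) = PySem.List.pyRange a (b+1) (-1) ++ [b+1] := by
  rw [PySem.List.pyRange_neg_one_eq_reverse, PySem.List.pyRange_one_cons (by omega),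
    List.reverse_cons, PySem.List.pyRange_neg_one_eq_reverse]

theorem getD_mid (p : List Int) (x : Int) (s : List Int) (k : Nat) (hk : k = p.length) :
    (p ++ x :: s).getD k 0 = x := by
  subst hk; rw [List.getD_append_right _ _ _ _ le_rfl]; simp

theorem set_mid (p : List Int) (x y : Int) (s : List Int) (k : Nat) (hk : k = p.length) :
    (p ++ x :: s).set k y = p ++ y :: s := by
  subst hk; rw [List.set_append]; simp

theorem getD_mid1 (p : List Int) (a x : Int) (s : List Int) (k : Nat) (hk : k = p.length + 1) :
    (p ++ a :: x :: s).getD k 0 = x := by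
  subst hk; rw [List.getD_append_right _ _ _ _ (by omega)]; simp

theorem set_mid1 (p : List Int) (a x y : Int) (s : List Int) (k : Nat) (hk : k = p.length + 1) :
    (p ++ a :: x :: s).set k y = p ++ a :: y :: s := by
  subst hk; rw [List.set_append]; simp

theorem carryA_loop (r : List Int) (m t : Nat) (hr : r.length = m + 1) (ht : t ≤ m) :
    (PySem.List.pyRange (m : Int) (t : Int) (-1)).foldl (fun r i =>
      let curr := r.getD i.toNat 0
      if curr > 9 then
        let carry := PySem.Int.floordiv curr 10
        let r' := r.set (i.toNat - 1) (r.getD (i.toNat - 1) 0 + carry)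
        r'.set i.toNat (PySem.Int.mod curr 10)
      else r) r
    = r.take t ++ (r.getD t 0 + (fixTail (r.drop (t+1))).1) :: (fixTail (r.drop (t+1))).2 := by
  obtain ⟨d, hd⟩ : ∃ d, m - t = d := ⟨m - t, rfl⟩
  induction d generalizing t with
  | zero =>
    have htm : t = m := by omega
    subst htm
    rw [PySem.List.pyRange_neg_one_eq_nil (by omega), List.foldl_nil]
    rw [List.drop_eq_nil_iff.2 (by omega)]
    simp only [fixTail, add_zero]
    conv_lhs => rw [← List.take_append_drop t r]
    congr 1
    rw [List.drop_eq_getElem_cons (by omega), List.drop_eq_nil_iff.2 (by omega),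
      List.getD_eq_getElem _ _ (by omega)]
  | succ d ih =>
    have htc : t < m := by omega
    rw [pyRange_neg_one_append_low _ _ (by exact_mod_cast htc), List.foldl_append]
    rw [show ((t:Int)+1) = (((t+1:Nat)):Int) by push_cast; ring]
    rw [ih (t+1) (by omega) (by omega)]
    have htake : r.take (t+1) = r.take t ++ [r.getD t 0] := by
      rw [List.getD_eq_getElem _ _ (by omega), ← List.take_concat_get (by omega),
        List.concat_eq_append]
    have hlen : (r.take t).length = t := by simp; omega
    have hdrop : r.drop (t+1) = r.getD (t+1) 0 :: r.drop (t+2) := by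
      rw [List.drop_eq_getElem_cons (by omega), List.getD_eq_getElem _ _ (by omega)]
    rw [htake, List.append_assoc, hdrop]
    simp only [fixTail, List.cons_append, List.nil_append]
    generalize fixTail (r.drop (t+2)) = P
    rw [List.foldl_cons, List.foldl_nil]
    have htn : ((↑(t+1) : Int)).toNat = t + 1 := by omega
    simp only [htn, Nat.add_sub_cancel]
    rw [getD_mid1 (r.take t) (r.getD t 0) (r.getD (t+1) 0 + P.1) (P.2) (t+1) (by omega)]
    by_cases hv : r.getD (t+1) 0 + P.1 > 9
    · rw [if_pos hv, if_pos hv]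
      rw [getD_mid (r.take t) (r.getD t 0) ((r.getD (t+1) 0 + P.1) :: P.2) t (by omega)]
      rw [set_mid (r.take t) (r.getD t 0)
            (r.getD t 0 + PySem.Int.floordiv (r.getD (t+1) 0 + P.1) 10)
            ((r.getD (t+1) 0 + P.1) :: P.2) t (by omega)]
      rw [set_mid1 (r.take t) (r.getD t 0 + PySem.Int.floordiv (r.getD (t+1) 0 + P.1) 10)
            (r.getD (t+1) 0 + P.1) (PySem.Int.mod (r.getD (t+1) 0 + P.1) 10) (P.2) (t+1) (by omega)]
    · rw [if_neg hv, if_neg hv]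
      simp

theorem carryB_loop (conv : List Int) (m t : Nat) (hc : conv.length = m + 1) (ht : t ≤ m)
    (acc : List Int) :
    (PySem.List.pyRange (m : Int) (t : Int) (-1)).foldl
      (fun (st : Int × List Int) (k : Int) =>
        let v := conv.getD k.toNat 0 + st.1
        if v > 9 then (PySem.Int.floordiv v 10, st.2 ++ [PySem.Int.mod v 10])
        else (0, st.2 ++ [v])) ((0 : Int), acc)
    = ((fixTail (conv.drop (t+1))).1, acc ++ (fixTail (conv.drop (t+1))).2.reverse) := by
  obtain ⟨d, hd⟩ : ∃ d, m - t = d := ⟨m - t, rfl⟩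
  induction d generalizing t with
  | zero =>
    have htm : t = m := by omega
    subst htm
    rw [PySem.List.pyRange_neg_one_eq_nil (by omega), List.foldl_nil,
      List.drop_eq_nil_iff.2 (by omega)]
    simp [fixTail]
  | succ d ih =>
    have htc : t < m := by omega
    rw [pyRange_neg_one_append_low _ _ (by exact_mod_cast htc), List.foldl_append]
    rw [show ((t:Int)+1) = (((t+1:Nat)):Int) by push_cast; ring]
    rw [ih (t+1) (by omega) (by omega)]
    have hdrop : conv.drop (t+1) = conv.getD (t+1) 0 :: conv.drop (t+2) := by
      rw [List.drop_eq_getElem_cons (by omega), List.getD_eq_getElem _ _ (by omega)]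
    rw [hdrop]
    simp only [fixTail]
    generalize fixTail (conv.drop (t+2)) = P
    rw [List.foldl_cons, List.foldl_nil]
    have htn : ((↑(t+1) : Int)).toNat = t + 1 := by omega
    simp only [htn]
    by_cases hv : conv.getD (t+1) 0 + P.1 > 9
    · rw [if_pos hv, if_pos hv]
      simp
    · rw [if_neg hv, if_neg hv]
      simp

-- the computed convolution lists agree
theorem res1_eq_convB (tab : List Int) :
    (List.range tab.length).foldl (fun r i =>
      (List.range tab.length).foldl (fun r j =>
        r.set (i+j) (r.getD (i+j) 0 + tab.getD i 0 * tab.getD j 0)) r)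
      ((List.range (tab.length*2)).map (fun _ => (0:Int)))
    = (List.range (2*tab.length)).map (fun k =>
        if k % 2 = 0 ∧ k / 2 < tab.length
        then 2 * ((List.range' (k + 1 - tab.length) ((k + 1) / 2 - (k + 1 - tab.length))).map
              (fun i => tab.getD i 0 * tab.getD (k - i) 0)).sum
              + tab.getD (k / 2) 0 * tab.getD (k / 2) 0
        else 2 * ((List.range' (k + 1 - tab.length) ((k + 1) / 2 - (k + 1 - tab.length))).map
              (fun i => tab.getD i 0 * tab.getD (k - i) 0)).sum) := by
  rw [loopA_eq_applyUpds]
  apply List.ext_getElem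
  · rw [applyUpds_length]; simp [Nat.mul_comm]
  · intro k h1 h2
    rw [applyUpds_length] at h1
    simp only [List.length_map, List.length_range] at h1 h2
    have hk : k < 2 * tab.length := by omega
    have hres0 : ∀ (k : Nat), ((List.range (tab.length*2)).map (fun _ => (0:Int))).getD k 0 = 0 := by
      intro k
      rcases Nat.lt_or_ge k (tab.length*2) with h | h
      · rw [List.getD_eq_getElem _ _ (by simpa using h)]; simp
      · rw [List.getD_eq_default _ _ (by simpa using h)]
    rw [← List.getD_eq_getElem _ 0, applyUpds_getD _ _
        (fun u hu => by rw [List.length_map, List.length_range]; exact pairsA_fst_lt tab u hu),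
      hres0, pairsA_sum, zero_add, List.getElem_map, List.getElem_range]
    show convS tab k = bEntry tab k
    rw [bEntry_eq_convS tab k hk]

theorem square_tab_spec_aux : ∀ (tab : List Int), square_tab tab = square_tab_alt tab := by
  intro tab
  rcases Nat.eq_zero_or_pos tab.length with hn | hn
  · rw [List.length_eq_zero_iff] at hn
    subst hn
    decide
  · unfold square_tab square_tab_alt
    dsimp only
    rw [PySem.List.foldl_append_singleton_eq_map, List.nil_append, res1_eq_convB]
    have hlen : ∀ (f : Nat → Int), ((List.range (2*tab.length)).map f).length = (2*tab.length - 1) + 1 := by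
      intro f; simp; omega
    have hcast : ((tab.length : Int))*2 - 1 = ((2*tab.length - 1 : Nat) : Int) := by omega
    have hcast2 : (2*(tab.length : Int)) - 1 = ((2*tab.length - 1 : Nat) : Int) := by omega
    have hA := carryA_loop ((List.range (2*tab.length)).map (fun k =>
        if k % 2 = 0 ∧ k / 2 < tab.length
        then 2 * ((List.range' (k + 1 - tab.length) ((k + 1) / 2 - (k + 1 - tab.length))).map
              (fun i => tab.getD i 0 * tab.getD (k - i) 0)).sum
              + tab.getD (k / 2) 0 * tab.getD (k / 2) 0
        else 2 * ((List.range' (k + 1 - tab.length) ((k + 1) / 2 - (k + 1 - tab.length))).map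
              (fun i => tab.getD i 0 * tab.getD (k - i) 0)).sum))
      (2*tab.length - 1) 0 (hlen _) (by omega)
    have hB := carryB_loop ((List.range (2*tab.length)).map (fun k =>
        if k % 2 = 0 ∧ k / 2 < tab.length
        then 2 * ((List.range' (k + 1 - tab.length) ((k + 1) / 2 - (k + 1 - tab.length))).map
              (fun i => tab.getD i 0 * tab.getD (k - i) 0)).sum
              + tab.getD (k / 2) 0 * tab.getD (k / 2) 0
        else 2 * ((List.range' (k + 1 - tab.length) ((k + 1) / 2 - (k + 1 - tab.length))).map
              (fun i => tab.getD i 0 * tab.getD (k - i) 0)).sum))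
      (2*tab.length - 1) 0 (hlen _) (by omega) []
    simp only [Nat.cast_zero] at hA hB
    rw [hcast, hA, hcast2, hB, if_pos hn]
    simp

-- ===== VERDICT (by name: the statement is the Claim_ definition above) =====
theorem square_tab_spec : Claim_equal_square_tab := by
  intro tab _
  exact square_tab_spec_aux tab
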